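-- pv_equiv track=rewrite | github.com/brownpg12/ga_tsp | ga_tsp.py | get_min_path
-- ===== SOURCE A (Python) =====
-- def get_min_path(pop_fitness,population):
--     this_min_fitness=min(pop_fitness)
--     this_min_path=[]
--     for j in range(0,len(pop_fitness) ):
--         if pop_fitness[j]==this_min_fitness:
--             this_min_path=population[j]
--             break
--
--     return this_min_fitness,this_min_path
-- ===== SOURCE B (Python) =====
-- def get_min_path(pop_fitness, population):
--     # single pass: track the minimum fitness and the index of its first occurrence
--     best = None
--     best_i = 0
--     for i, f in enumerate(pop_fitness):
--         if best is None or f < best: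
--             best = f
--             best_i = i
--     if best is None:
--         raise ValueError("min() arg is an empty sequence")
--     return best, population[best_i]
-- ===== Notes on version B (the rewrite author's own statement) =====
-- stated objective: alternative
-- what changed: Replaces A's min() scan followed by a second index-hunting scan with one enumerate pass that tracks the minimum and the index of its first occurrence (strict-less update preserves first-on-ties).
import Mathlib
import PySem

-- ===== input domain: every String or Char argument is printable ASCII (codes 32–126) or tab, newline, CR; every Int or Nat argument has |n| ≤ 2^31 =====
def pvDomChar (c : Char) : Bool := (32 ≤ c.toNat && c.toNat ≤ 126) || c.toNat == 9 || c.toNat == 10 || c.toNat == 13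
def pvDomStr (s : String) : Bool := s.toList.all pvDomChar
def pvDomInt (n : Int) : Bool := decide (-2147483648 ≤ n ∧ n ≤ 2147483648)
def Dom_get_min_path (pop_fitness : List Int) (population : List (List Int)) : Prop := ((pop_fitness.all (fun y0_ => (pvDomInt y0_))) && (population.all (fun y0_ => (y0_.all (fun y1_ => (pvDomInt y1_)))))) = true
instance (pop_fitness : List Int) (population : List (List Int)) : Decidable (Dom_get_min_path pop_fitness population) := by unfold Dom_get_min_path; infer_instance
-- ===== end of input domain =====

-- B replaces A's min() scan plus a second first-index scan with one enumerate pass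
-- tracking the minimum and the index of its first occurrence (same values, one pass).


-- ===== PORT A =====
-- A's `for j in range(0, len(pop_fitness)): if pop_fitness[j]==m: path=population[j]; break`,
-- as recursion on the index j (indices stay in range of pop_fitness by construction).
def aScan (pop_fitness : List Int) (population : List (List Int)) (m : Int) (j : Nat) :
    List Int :=
  if _h : j < pop_fitness.length then
    if pop_fitness.getD j 0 = m then population.getD j []
    else aScan pop_fitness population m (j + 1)
  else []
termination_by pop_fitness.length - j

def get_min_path (pop_fitness : List Int) (population : List (List Int)) : Int × List Int :=
  match PySem.List.min? pop_fitness (fun y => y) with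
  | none => (0, [])   -- Python: min([]) raises ValueError; excluded by Pre_
  | some m => (m, aScan pop_fitness population m 0)

-- ===== PORT B =====
-- B's single enumerate pass: best initialised to the first element (index 0),
-- then strict-less updates over the tail.
def bLoop : List Int → Int → Nat → Nat → Int × Nat
  | [], best, bi, _ => (best, bi)
  | f :: rest, best, bi, i =>
    if f < best then bLoop rest f i (i + 1) else bLoop rest best bi (i + 1)

def get_min_path_alt (pop_fitness : List Int) (population : List (List Int)) : Int × List Int :=
  match pop_fitness with
  | [] => (0, [])     -- Python B raises ValueError; excluded by Pre_
  | f :: rest =>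
    let p := bLoop rest f 0 1
    (p.1, population.getD p.2 [])   -- population[best_i]: out of range excluded by Pre_

-- ===== PRECONDITION & SPEC =====
-- Pre_ excludes exactly the inputs where A raises: empty pop_fitness (ValueError from min)
-- and inputs where the first index of the minimum is out of range of population (IndexError).
def Pre_get_min_path (pop_fitness : List Int) (population : List (List Int)) : Prop :=
  pop_fitness ≠ [] ∧
  pop_fitness.idxOf (((pop_fitness.min?).getD 0)) < population.length
instance (pop_fitness : List Int) (population : List (List Int)) : Decidable (Pre_get_min_path pop_fitness population) := by unfold Pre_get_min_path; infer_instance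

def pvWitness_get_min_path : List Int × List (List Int) := ([3, 1, 1], [[0], [7, 8], [9]])

def Spec_get_min_path (pop_fitness : List Int) (population : List (List Int)) (out : Int × List Int) : Prop := out = get_min_path_alt pop_fitness population
instance (pop_fitness : List Int) (population : List (List Int)) (out : Int × List Int) : Decidable (Spec_get_min_path pop_fitness population out) := by unfold Spec_get_min_path; infer_instance

-- ===== CLAIM (what is proved, stated in full; the proofs are below) =====
def Claim_equal_get_min_path : Prop := ∀ (pop_fitness : List Int) (population : List (List Int)), Dom_get_min_path pop_fitness population → Pre_get_min_path pop_fitness population → Spec_get_min_path pop_fitness population (get_min_path pop_fitness population)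

-- ===== LEMMAS AND PROOFS =====

theorem foldl_min_le_init (l : List Int) (a : Int) : l.foldl min a ≤ a := by
  induction l generalizing a with
  | nil => simp
  | cons x t ih => exact le_trans (ih (min a x)) (min_le_left a x)

theorem idxOf_cons_self (a : Int) (l : List Int) : (a :: l).idxOf a = 0 := by simp

theorem idxOf_cons_ne (a b : Int) (l : List Int) (h : a ≠ b) :
    (a :: l).idxOf b = (l.idxOf b) + 1 := by simp [h]

-- B's loop computes (running min, index of its first occurrence)
theorem bLoop_spec (l : List Int) (best : Int) (bi i : Nat) :
    bLoop l best bi i =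
      if l.foldl min best < best
      then (l.foldl min best, i + (l.idxOf (l.foldl min best)))
      else (best, bi) := by
  induction l generalizing best bi i with
  | nil => simp [bLoop]
  | cons x t ih =>
    show (if x < best then bLoop t x i (i + 1) else bLoop t best bi (i + 1)) = _
    simp only [List.foldl_cons]
    by_cases hx : x < best
    · rw [if_pos hx, ih, min_eq_right hx.le]
      rw [if_pos (lt_of_le_of_lt (foldl_min_le_init t x) hx)]
      by_cases hm : t.foldl min x < x
      · rw [if_pos hm, idxOf_cons_ne x _ t (ne_of_lt hm).symm]
        have : i + 1 + t.idxOf (t.foldl min x) = i + (t.idxOf (t.foldl min x) + 1) := by omega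
        rw [this]
      · rw [if_neg hm]
        have hx' : t.foldl min x = x := le_antisymm (foldl_min_le_init t x) (not_lt.1 hm)
        rw [hx', idxOf_cons_self]
        simp
    · rw [if_neg hx, ih, min_eq_left (not_lt.1 hx)]
      by_cases hm : t.foldl min best < best
      · rw [if_pos hm, if_pos hm]
        have hne : x ≠ t.foldl min best :=
          (ne_of_lt (lt_of_lt_of_le hm (not_lt.1 hx))).symm
        rw [idxOf_cons_ne x _ t hne]
        have : i + 1 + t.idxOf (t.foldl min best) = i + (t.idxOf (t.foldl min best) + 1) := by
          omega
        rw [this]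
      · rw [if_neg hm, if_neg hm]

theorem foldl_min_mem (l : List Int) (a : Int) : l.foldl min a = a ∨ l.foldl min a ∈ l := by
  induction l generalizing a with
  | nil => simp
  | cons x t ih =>
    simp only [List.foldl_cons]
    rcases ih (min a x) with h | h
    · rcases min_cases a x with ⟨he, _⟩ | ⟨he, _⟩
      · exact Or.inl (by rw [he] at h ⊢; exact h)
      · refine Or.inr ?_
        rw [he] at h
        rw [he, h]
        exact List.mem_cons_self
    · exact Or.inr (List.mem_cons_of_mem _ h)

-- A's scan from index j returns population[j + first index of m in (drop j)], if m occurs there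
theorem aScan_spec (pf : List Int) (pop : List (List Int)) (m : Int) (j : Nat)
    (hm : m ∈ pf.drop j) :
    aScan pf pop m j = pop.getD (j + ((pf.drop j).idxOf m)) [] := by
  have hj : j < pf.length := by
    by_contra h
    rw [List.drop_eq_nil_of_le (not_lt.1 h)] at hm
    simp at hm
  rw [aScan, dif_pos hj]
  have hdrop : pf.drop j = pf[j] :: pf.drop (j + 1) := List.drop_eq_getElem_cons hj
  by_cases he : pf.getD j 0 = m
  · have hgj : pf[j] = m := by rwa [List.getD_eq_getElem _ _ hj] at he
    rw [if_pos he, hdrop, hgj, idxOf_cons_self]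
    simp
  · rw [if_neg he]
    have hgj : pf[j] ≠ m := by rwa [List.getD_eq_getElem _ _ hj] at he
    have hm' : m ∈ pf.drop (j + 1) := by
      rw [hdrop] at hm
      rcases List.mem_cons.1 hm with h | h
      · exact absurd h.symm hgj
      · exact h
    rw [aScan_spec pf pop m (j + 1) hm', hdrop, idxOf_cons_ne _ _ _ hgj]
    have : j + 1 + (pf.drop (j + 1)).idxOf m = j + ((pf.drop (j + 1)).idxOf m + 1) := by omega
    rw [this]
termination_by pf.length - j

-- the two ports agree on nonempty input
theorem ports_eq (pf : List Int) (pop : List (List Int)) (h : pf ≠ []) :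
    get_min_path pf pop = get_min_path_alt pf pop := by
  match pf with
  | [] => exact absurd rfl h
  | f :: rest =>
    simp only [get_min_path, get_min_path_alt, PySem.List.min?_id_cons, bLoop_spec]
    have hmem : rest.foldl min f ∈ f :: rest := by
      rcases foldl_min_mem rest f with h | h
      · simp [h]
      · exact List.mem_cons_of_mem _ h
    have hscan := aScan_spec (f :: rest) pop (rest.foldl min f) 0 (by simpa using hmem)
    simp only [List.drop_zero, Nat.zero_add] at hscan
    rw [hscan]
    by_cases hlt : rest.foldl min f < f
    · rw [if_pos hlt, idxOf_cons_ne f _ rest (ne_of_lt hlt).symm]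
      have : (0 : Nat) + 1 + rest.idxOf (rest.foldl min f)
          = rest.idxOf (rest.foldl min f) + 1 := by omega
      simp [this]
    · rw [if_neg hlt]
      have heq : rest.foldl min f = f := le_antisymm (foldl_min_le_init rest f) (not_lt.1 hlt)
      rw [heq, idxOf_cons_self]

-- ===== VERDICT (by name: the statement is the Claim_ definition above) =====
theorem get_min_path_spec : Claim_equal_get_min_path := by
  intro pf pop _ hpre
  unfold Spec_get_min_path
  exact ports_eq pf pop hpre.1
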